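-- pv_equiv track=rewrite | github.com/LeanneNortje/MultimodalSpeech-to-ImageMatching | Few_shot_learning/generate_unimodal_speech_episodes.py | filter_buckeye_set
-- ===== SOURCE A (Python) =====
-- def filter_buckeye_set(subset, subset_keys, subset_labels, M, K, Q):
--
-- 	minimum = K + 2
--
-- 	label_count = {}
--
-- 	for label in subset_labels:
-- 		if label not in label_count:
-- 			label_count[label] = 1
--
-- 		else:
-- 			label_count[label] += 1
--
-- 	valid_labels = []
--
-- 	for label in label_count:
-- 		if label_count[label] >= minimum: valid_labels.append(label)
--
-- 	updated_subset = []
-- 	updated_labels = []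
-- 	updated_keys = []
-- 	updated_lengths = []
--
-- 	for i in range(len(subset_labels)):
-- 		if subset_labels[i] in valid_labels:
-- 			updated_subset.append(subset[i])
-- 			updated_keys.append(subset_keys[i])
-- 			updated_labels.append(subset_labels[i])
-- 			updated_lengths.append(len(subset[i]))
--
-- 	return updated_subset, updated_keys, updated_labels, updated_lengths
-- ===== SOURCE B (Python) =====
-- def filter_buckeye_set(subset, subset_keys, subset_labels, M, K, Q):
--
-- 	minimum = K + 2
--
-- 	positions = {}
--
-- 	for i, label in enumerate(subset_labels):
-- 		if label in positions:
-- 			positions[label].append(i)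
-- 		else:
-- 			positions[label] = [i]
--
-- 	kept = sorted(i for group in positions.values() if len(group) >= minimum for i in group)
--
-- 	updated_subset = [subset[i] for i in kept]
-- 	updated_keys = [subset_keys[i] for i in kept]
-- 	updated_labels = [subset_labels[i] for i in kept]
-- 	updated_lengths = [len(s) for s in updated_subset]
--
-- 	return updated_subset, updated_keys, updated_labels, updated_lengths
-- ===== Notes on version B (the rewrite author's own statement) =====
-- stated objective: alternative
-- what changed: B replaces A's count-then-rescan strategy by an inverted index: it groups the positions of each label into a dict label->index-list, keeps the groups whose size is at least K+2, restores the original order by sorting the union of the kept indices, and gathers the four outputs from those indices.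
import Mathlib
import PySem

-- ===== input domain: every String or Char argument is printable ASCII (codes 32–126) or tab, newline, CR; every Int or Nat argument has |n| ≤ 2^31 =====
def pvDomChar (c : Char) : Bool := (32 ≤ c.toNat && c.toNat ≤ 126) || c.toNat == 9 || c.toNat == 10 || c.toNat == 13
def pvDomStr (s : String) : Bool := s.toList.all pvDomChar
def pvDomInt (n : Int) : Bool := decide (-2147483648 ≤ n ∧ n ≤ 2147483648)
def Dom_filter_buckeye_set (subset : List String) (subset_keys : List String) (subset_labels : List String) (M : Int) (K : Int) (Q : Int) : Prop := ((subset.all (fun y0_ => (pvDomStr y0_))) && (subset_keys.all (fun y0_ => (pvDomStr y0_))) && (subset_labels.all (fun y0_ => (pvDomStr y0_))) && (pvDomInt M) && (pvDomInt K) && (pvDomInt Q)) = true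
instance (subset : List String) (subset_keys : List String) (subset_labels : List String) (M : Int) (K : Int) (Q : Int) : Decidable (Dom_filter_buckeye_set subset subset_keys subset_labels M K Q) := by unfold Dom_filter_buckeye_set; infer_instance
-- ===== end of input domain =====

-- B: instead of counting labels and re-scanning, builds an inverted index label -> list of positions,
-- keeps the groups of size ≥ K+2, sorts the union of kept indices and gathers the outputs from them.

-- ===== PORT A =====
def filter_buckeye_set (subset : List String) (subset_keys : List String) (subset_labels : List String) (M : Int) (K : Int) (Q : Int) : List String × List String × List String × List Int :=
  let minimum : Int := K + 2
  let label_count : PySem.Dict String Int :=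
    subset_labels.foldl (fun d label =>
      if d.contains label = false then d.insert label 1
      else d.modify label 0 (· + 1)) PySem.Dict.empty
  let valid_labels : List String :=
    label_count.keys.foldl (fun acc label =>
      if minimum ≤ label_count.getD label 0 then acc ++ [label] else acc) []
  (PySem.List.pyRange 0 (subset_labels.length : Int) 1).foldl (fun r i =>
    if valid_labels.contains (PySem.List.pyGetD subset_labels i "") then
      (r.1 ++ [PySem.List.pyGetD subset i ""],
       r.2.1 ++ [PySem.List.pyGetD subset_keys i ""],
       r.2.2.1 ++ [PySem.List.pyGetD subset_labels i ""],
       r.2.2.2 ++ [PySem.Str.len (PySem.List.pyGetD subset i "")])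
    else r) (([] : List String), ([] : List String), ([] : List String), ([] : List Int))

-- ===== PORT B =====
def filter_buckeye_set_alt (subset : List String) (subset_keys : List String) (subset_labels : List String) (M : Int) (K : Int) (Q : Int) : List String × List String × List String × List Int :=
  let minimum : Int := K + 2
  let positions : PySem.Dict String (List Int) :=
    (PySem.List.enumerate subset_labels 0).foldl (fun d p =>
      if d.contains p.2 then d.modify p.2 [] (· ++ [p.1])
      else d.insert p.2 [p.1]) PySem.Dict.empty
  let kept : List Int := PySem.List.sorted
    (positions.values.foldl (fun acc group =>
      if minimum ≤ (group.length : Int) then acc ++ group else acc) [])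
    (fun x => x) false
  let updated_subset : List String := kept.map (fun i => PySem.List.pyGetD subset i "")
  let updated_keys : List String := kept.map (fun i => PySem.List.pyGetD subset_keys i "")
  let updated_labels : List String := kept.map (fun i => PySem.List.pyGetD subset_labels i "")
  let updated_lengths : List Int := updated_subset.map (fun s => PySem.Str.len s)
  (updated_subset, updated_keys, updated_labels, updated_lengths)

-- ===== PRECONDITION & SPEC =====
-- Pre_ excludes exactly the inputs where A raises IndexError: some index whose label occurs at least
-- K+2 times lies beyond the end of subset or subset_keys.
def Pre_filter_buckeye_set (subset : List String) (subset_keys : List String) (subset_labels : List String) (M : Int) (K : Int) (Q : Int) : Prop :=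
  ∀ (k : Nat) (hk : k < subset_labels.length),
    K + 2 ≤ (subset_labels.count (subset_labels[k]'hk) : Int) →
    k < subset.length ∧ k < subset_keys.length
instance (subset : List String) (subset_keys : List String) (subset_labels : List String) (M : Int) (K : Int) (Q : Int) : Decidable (Pre_filter_buckeye_set subset subset_keys subset_labels M K Q) := by unfold Pre_filter_buckeye_set; infer_instance
def pvWitness_filter_buckeye_set : List String × List String × List String × Int × Int × Int :=
  (["ab", "cd", "ef"], ["k1", "k2", "k3"], ["x", "y", "x"], 3, 0, 1)
def Spec_filter_buckeye_set (subset : List String) (subset_keys : List String) (subset_labels : List String) (M : Int) (K : Int) (Q : Int) (out : List String × List String × List String × List Int) : Prop := out = filter_buckeye_set_alt subset subset_keys subset_labels M K Q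
instance (subset : List String) (subset_keys : List String) (subset_labels : List String) (M : Int) (K : Int) (Q : Int) (out : List String × List String × List String × List Int) : Decidable (Spec_filter_buckeye_set subset subset_keys subset_labels M K Q out) := by unfold Spec_filter_buckeye_set; infer_instance

-- ===== CLAIM (what is proved, stated in full; the proofs are below) =====
def Claim_equal_filter_buckeye_set : Prop := ∀ (subset : List String) (subset_keys : List String) (subset_labels : List String) (M : Int) (K : Int) (Q : Int), Dom_filter_buckeye_set subset subset_keys subset_labels M K Q → Pre_filter_buckeye_set subset subset_keys subset_labels M K Q → Spec_filter_buckeye_set subset subset_keys subset_labels M K Q (filter_buckeye_set subset subset_keys subset_labels M K Q)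

-- ===== LEMMAS AND PROOFS =====

-- A's counting loop (insert-1 / modify-(+1)) builds exactly Counter(subset_labels).
lemma countA_eq_counter (ls : List String) :
    ls.foldl (fun d label =>
      if d.contains label = false then d.insert label 1
      else d.modify label 0 (· + 1)) PySem.Dict.empty = PySem.Dict.counter ls := by
  rw [PySem.Dict.counter_eq_foldl]
  apply PySem.List.foldl_congr_mem
  intro d label _
  by_cases hc : d.contains label = true
  · simp [hc]
  · simp only [eq_false_of_ne_true hc]
    simp [PySem.Dict.insert, PySem.Dict.modify, hc,
      PySem.Dict.getD_of_not_contains d 0 (eq_false_of_ne_true hc)]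

-- B's grouping loop (append / fresh-[i]) is an unconditional modify-append loop.
lemma groupB_eq_modify (E : List (Int × String)) :
    E.foldl (fun d p =>
      if d.contains p.2 then d.modify p.2 [] (· ++ [p.1])
      else d.insert p.2 [p.1]) PySem.Dict.empty
    = E.foldl (fun d p => d.modify p.2 [] (· ++ [p.1])) PySem.Dict.empty := by
  apply PySem.List.foldl_congr_mem
  intro d p _
  by_cases hc : d.contains p.2 = true
  · simp [hc]
  · simp [hc, PySem.Dict.insert, PySem.Dict.modify,
      PySem.Dict.getD_of_not_contains d [] (eq_false_of_ne_true hc)]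

-- A filtering loop with four parallel appends is the quadruple of maps over the filtered list.
lemma quad_foldl {α : Type} (P : α → Prop) [DecidablePred P]
    (f1 f2 : α → String) (f3 : α → String) (f4 : α → Int) :
    ∀ (l : List α) (a1 a2 a3 : List String) (a4 : List Int),
      l.foldl (fun r x =>
        if P x then (r.1 ++ [f1 x], r.2.1 ++ [f2 x], r.2.2.1 ++ [f3 x], r.2.2.2 ++ [f4 x])
        else r) (a1, a2, a3, a4)
      = (a1 ++ (l.filter (fun x => decide (P x))).map f1,
         a2 ++ (l.filter (fun x => decide (P x))).map f2,
         a3 ++ (l.filter (fun x => decide (P x))).map f3,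
         a4 ++ (l.filter (fun x => decide (P x))).map f4) := by
  intro l
  induction l with
  | nil => intro a1 a2 a3 a4; simp
  | cons x t ih =>
    intro a1 a2 a3 a4
    by_cases hx : P x
    · simp only [List.foldl_cons, if_pos hx, List.filter_cons, decide_eq_true hx]
      rw [ih]
      simp
    · simp only [List.foldl_cons, if_neg hx, List.filter_cons, decide_eq_false hx]
      rw [ih]
      simp

-- distinct first components in an enumeration: equal index means equal pair
lemma enum_fst_inj (ls : List String) {p q : Int × String}
    (hp : p ∈ PySem.List.enumerate ls 0) (hq : q ∈ PySem.List.enumerate ls 0)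
    (h : p.1 = q.1) : p = q := by
  rcases (PySem.List.mem_enumerate_iff _ _ _).mp hp with ⟨k, hk, rfl⟩
  rcases (PySem.List.mem_enumerate_iff _ _ _).mp hq with ⟨k', hk', rfl⟩
  simp only [zero_add] at h
  have : k = k' := by exact_mod_cast h
  subst this; rfl

-- the group of a label: B's dict value at lab is the (increasing) list of positions of lab
lemma groups_getD (ls : List String) (lab : String) :
    ((PySem.List.enumerate ls 0).foldl
        (fun d p => d.modify p.2 [] (· ++ [p.1])) PySem.Dict.empty).getD lab []
    = (((PySem.List.enumerate ls 0).filter (fun p => p.2 == lab)).map (·.1)) := by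
  have h : (PySem.List.enumerate ls 0).foldl
      (fun d p => d.modify p.2 [] (· ++ [p.1])) PySem.Dict.empty
      = ((PySem.List.enumerate ls 0).map (fun p => (p.2, p.1))).foldl
        (fun (d : PySem.Dict String (List Int)) p => d.modify p.1 [] (· ++ [p.2]))
        PySem.Dict.empty := by
    rw [List.foldl_map]
  rw [h, PySem.Dict.getD_foldl_modify_append]
  simp [List.filter_map, List.map_map, Function.comp_def]

-- the kept indices, sorted, are exactly the valid positions in original order
lemma kept_eq (ls : List String) (K : Int) :
    (PySem.List.sorted
      ((((PySem.List.enumerate ls 0).foldl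
        (fun d p => d.modify p.2 [] (· ++ [p.1])) PySem.Dict.empty).values).foldl
        (fun acc group => if K + 2 ≤ (group.length : Int) then acc ++ group else acc) [])
      (fun x => x) false)
    = ((PySem.List.enumerate ls 0).filter
        (fun p => decide (K + 2 ≤ (ls.count p.2 : Int)))).map (·.1) := by
  have hE : ∀ p ∈ PySem.List.enumerate ls 0, p.2 ∈ ls := by
    intro p hp
    rcases (PySem.List.mem_enumerate_iff _ _ _).mp hp with ⟨k, hk, rfl⟩
    exact List.getElem_mem hk
  -- the grouping dict
  set d := (PySem.List.enumerate ls 0).foldl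
    (fun d p => d.modify p.2 [] (· ++ [p.1])) PySem.Dict.empty with hd
  have hkeys : d.keys = PySem.Set.ofList ls := by
    rw [hd, PySem.Dict.keys_foldl_modify_key]
    simp [PySem.List.map_snd_enumerate, PySem.Dict.keys_empty,
      PySem.Set.update, PySem.Set.ofList_eq_foldl]
  have hnd : d.keys.Nodup := by rw [hkeys]; exact PySem.Set.nodup_ofList ls
  have hvals : d.values = d.keys.map (fun k => d.getD k []) :=
    PySem.Dict.values_eq_map_keys d hnd []
  -- each group's length is the label's count
  have hlen : ∀ lab : String,
      ((((PySem.List.enumerate ls 0).filter (fun p => p.2 == lab)).map (·.1)).length : Int)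
      = (ls.count lab : Int) := by
    intro lab
    congr 1
    rw [List.length_map, ← List.countP_eq_length_filter]
    conv_rhs => rw [← PySem.List.map_snd_enumerate ls (0 : Int)]
    rw [List.count_eq_countP, List.countP_map]
    rfl
  -- the concatenation of the kept groups
  have hflat : (d.values.foldl
      (fun acc group => if K + 2 ≤ (group.length : Int) then acc ++ group else acc) [])
      = (((PySem.Set.ofList ls).filter
            (fun lab => decide (K + 2 ≤ (ls.count lab : Int)))).map
          (fun lab => ((PySem.List.enumerate ls 0).filter (fun p => p.2 == lab)).map (·.1))).flatten := by
    rw [PySem.List.foldl_ite_eq_foldl_filter, PySem.List.foldl_append_eq_flatten]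
    rw [hvals, hkeys, List.filter_map, List.nil_append]
    have hfc : List.filter ((fun x : List Int => decide (K + 2 ≤ (x.length : Int))) ∘
          fun k => d.getD k []) (PySem.Set.ofList ls)
        = List.filter (fun lab => decide (K + 2 ≤ (ls.count lab : Int))) (PySem.Set.ofList ls) := by
      apply List.filter_congr
      intro lab _
      simp only [Function.comp, decide_eq_decide]
      rw [hd, groups_getD, hlen]
    rw [hfc]
    congr 1
    apply List.map_congr_left
    intro lab _
    rw [hd, groups_getD]
  rw [hflat]
  -- name the target list and show it is the sorted order
  apply PySem.List.sorted_eq_of_perm_of_pairwise_lt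
  · -- permutation: same members, both duplicate-free
    have hpwE : (PySem.List.enumerate ls (0 : Int)).Pairwise (fun p q => p.1 < q.1) :=
      PySem.List.pairwise_lt_enumerate ls 0
    have ndF : (((PySem.List.enumerate ls 0).filter
        (fun p => decide (K + 2 ≤ (ls.count p.2 : Int)))).map (·.1)).Nodup := by
      show _root_.List.Pairwise (· ≠ ·) _
      rw [List.pairwise_map]
      exact (hpwE.filter _).imp (fun h => ne_of_lt h)
    have ndG : ∀ lab : String,
        (((PySem.List.enumerate ls 0).filter (fun p => p.2 == lab)).map (·.1)).Nodup := by
      intro lab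
      show _root_.List.Pairwise (· ≠ ·) _
      rw [List.pairwise_map]
      exact (hpwE.filter _).imp (fun h => ne_of_lt h)
    have ndFlat : ((((PySem.Set.ofList ls).filter
          (fun lab => decide (K + 2 ≤ (ls.count lab : Int)))).map
        (fun lab => ((PySem.List.enumerate ls 0).filter (fun p => p.2 == lab)).map (·.1))).flatten).Nodup := by
      rw [List.nodup_flatten]
      constructor
      · intro l hl
        rcases List.mem_map.mp hl with ⟨lab, _, rfl⟩
        exact ndG lab
      · rw [List.pairwise_map]
        have ndset : ((PySem.Set.ofList ls).filter
            (fun lab => decide (K + 2 ≤ (ls.count lab : Int)))).Nodup :=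
          (PySem.Set.nodup_ofList ls).filter _
        refine ndset.imp_of_mem ?_
        intro lab lab' _ _ hne
        rw [List.disjoint_left]
        intro i hi hi'
        rcases List.mem_map.mp hi with ⟨p, hp, rfl⟩
        rcases List.mem_map.mp hi' with ⟨q, hq, hpq⟩
        have hp' := List.mem_filter.mp hp
        have hq' := List.mem_filter.mp hq
        have : p = q := enum_fst_inj ls hp'.1 hq'.1 hpq.symm
        apply hne
        have h2 : p.2 = lab := by simpa using hp'.2
        have h3 : q.2 = lab' := by simpa using hq'.2
        rw [← h2, ← h3, this]
    apply (List.perm_ext_iff_of_nodup ndF ndFlat).mpr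
    intro i
    constructor
    · intro hi
      rcases List.mem_map.mp hi with ⟨p, hp, rfl⟩
      have hp' := List.mem_filter.mp hp
      rw [List.mem_flatten]
      refine ⟨((PySem.List.enumerate ls 0).filter (fun q => q.2 == p.2)).map (·.1), ?_, ?_⟩
      · apply List.mem_map.mpr
        refine ⟨p.2, List.mem_filter.mpr ⟨?_, hp'.2⟩, rfl⟩
        exact (PySem.Set.mem_ofList _ _).mpr (hE p hp'.1)
      · exact List.mem_map.mpr ⟨p, List.mem_filter.mpr ⟨hp'.1, by simp⟩, rfl⟩
    · intro hi
      rcases List.mem_flatten.mp hi with ⟨g, hg, hig⟩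
      rcases List.mem_map.mp hg with ⟨lab, hlab, rfl⟩
      rcases List.mem_map.mp hig with ⟨p, hp, rfl⟩
      have hp' := List.mem_filter.mp hp
      have hlab' := List.mem_filter.mp hlab
      apply List.mem_map.mpr
      refine ⟨p, List.mem_filter.mpr ⟨hp'.1, ?_⟩, rfl⟩
      have h2 : p.2 = lab := by simpa using hp'.2
      rw [h2]
      exact hlab'.2
  · -- the valid positions are strictly increasing
    rw [List.pairwise_map]
    exact ((PySem.List.pairwise_lt_enumerate ls 0).filter _)

-- ===== VERDICT (by name: the statement is the Claim_ definition above) =====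
theorem filter_buckeye_set_spec : Claim_equal_filter_buckeye_set := by
  intro ss ks ls M K Q _hdom _hpre
  unfold Spec_filter_buckeye_set
  simp only [filter_buckeye_set, filter_buckeye_set_alt]
  rw [countA_eq_counter, PySem.List.foldl_append_ite_eq_filter, PySem.Dict.keys_counter]
  simp only [PySem.Dict.getD_counter, List.nil_append]
  -- turn A's index loop into a fold over enumerate ls 0
  have hA : (PySem.List.pyRange 0 (ls.length : Int) 1).foldl (fun r i =>
      if (((PySem.Set.ofList ls).filter
            (fun label => decide (K + 2 ≤ (ls.count label : Int)))).contains
          (PySem.List.pyGetD ls i "")) = true then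
        (r.1 ++ [PySem.List.pyGetD ss i ""],
         r.2.1 ++ [PySem.List.pyGetD ks i ""],
         r.2.2.1 ++ [PySem.List.pyGetD ls i ""],
         r.2.2.2 ++ [PySem.Str.len (PySem.List.pyGetD ss i "")])
      else r) (([] : List String), ([] : List String), ([] : List String), ([] : List Int))
      = (PySem.List.enumerate ls 0).foldl (fun r p =>
      if (((PySem.Set.ofList ls).filter
            (fun label => decide (K + 2 ≤ (ls.count label : Int)))).contains p.2) = true then
        (r.1 ++ [PySem.List.pyGetD ss p.1 ""],
         r.2.1 ++ [PySem.List.pyGetD ks p.1 ""],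
         r.2.2.1 ++ [p.2],
         r.2.2.2 ++ [PySem.Str.len (PySem.List.pyGetD ss p.1 "")])
      else r) (([] : List String), ([] : List String), ([] : List String), ([] : List Int)) := by
    rw [PySem.List.enumerate_eq_map_pyRange ls "", List.foldl_map]
    simp [PySem.List.len_eq]
  rw [hA]
  -- replace the valid_labels membership test by the inline count threshold
  have htest : ∀ (p : Int × String), p ∈ PySem.List.enumerate ls 0 →
      (((((PySem.Set.ofList ls).filter
          (fun label => decide (K + 2 ≤ (ls.count label : Int)))).contains p.2) = true)
        ↔ (K + 2 ≤ (ls.count p.2 : Int))) := by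
    intro p hp
    rcases (PySem.List.mem_enumerate_iff _ _ _).mp hp with ⟨k, hk, rfl⟩
    simp [List.mem_filter, PySem.Set.mem_ofList, List.getElem_mem hk]
  have hcong : (PySem.List.enumerate ls 0).foldl (fun r p =>
      if (((PySem.Set.ofList ls).filter
            (fun label => decide (K + 2 ≤ (ls.count label : Int)))).contains p.2) = true then
        (r.1 ++ [PySem.List.pyGetD ss p.1 ""],
         r.2.1 ++ [PySem.List.pyGetD ks p.1 ""],
         r.2.2.1 ++ [p.2],
         r.2.2.2 ++ [PySem.Str.len (PySem.List.pyGetD ss p.1 "")])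
      else r) (([] : List String), ([] : List String), ([] : List String), ([] : List Int))
      = (PySem.List.enumerate ls 0).foldl (fun r p =>
      if K + 2 ≤ (ls.count p.2 : Int) then
        (r.1 ++ [PySem.List.pyGetD ss p.1 ""],
         r.2.1 ++ [PySem.List.pyGetD ks p.1 ""],
         r.2.2.1 ++ [p.2],
         r.2.2.2 ++ [PySem.Str.len (PySem.List.pyGetD ss p.1 "")])
      else r) (([] : List String), ([] : List String), ([] : List String), ([] : List Int)) :=
    PySem.List.foldl_congr_mem _ _ _ _ (fun r p hp => if_congr (htest p hp) rfl rfl)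
  rw [hcong]
  rw [quad_foldl (fun p : Int × String => K + 2 ≤ (ls.count p.2 : Int))
      (fun p => PySem.List.pyGetD ss p.1 "") (fun p => PySem.List.pyGetD ks p.1 "")
      (fun p => p.2) (fun p => PySem.Str.len (PySem.List.pyGetD ss p.1 ""))]
  -- the B side: the sorted kept indices are the valid positions in order
  rw [groupB_eq_modify, kept_eq]
  simp only [List.map_map, List.nil_append, Function.comp_def]
  -- the label gathered at a kept index is the pair's own label
  have hlab : ((PySem.List.enumerate ls 0).filter
        (fun p => decide (K + 2 ≤ (ls.count p.2 : Int)))).map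
        (fun p => PySem.List.pyGetD ls p.1 "")
      = ((PySem.List.enumerate ls 0).filter
        (fun p => decide (K + 2 ≤ (ls.count p.2 : Int)))).map (fun p => p.2) := by
    apply List.map_congr_left
    intro p hp
    have hpE : p ∈ PySem.List.enumerate ls 0 := (List.mem_filter.mp hp).1
    rcases (PySem.List.mem_enumerate_iff _ _ _).mp hpE with ⟨k, hk, rfl⟩
    simp [PySem.List.pyGetD_natCast, List.getD_eq_getElem?_getD, List.getElem?_eq_getElem hk]
  rw [hlab]
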